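-- pv_equiv track=rewrite | github.com/oblivia-simplex/jira-dashboard | libdash/displayfuncs.py | compress_report
-- ===== SOURCE A (Python) =====
-- def compress_report(rows):
--
--   rep = {}
--   for row in rows:
--     if row not in rep.keys():
--       rep[row] = 1
--     else:
--       rep[row] += 1
--
--   report = []
--   for k in rep.keys():
--     if rep[k] > 1:
--       report.append(k + ' (x{})'.format(rep[k]))
--     else:
--       report.append(k)
--
--   return report
-- ===== SOURCE B (Python) =====
-- def compress_report(rows):
--   seen = set()
--   report = []
--   for row in rows:
--     if row in seen:
--       continue
--     c = rows.count(row)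
--     report.append(row if c == 1 else row + ' (x{})'.format(c))
--     seen.add(row)
--   return report
-- ===== Notes on version B (the rewrite author's own statement) =====
-- stated objective: alternative
-- what changed: A builds a full count dict in one pass and then formats its keys in a second pass; B is a single pass over rows with a 'seen' set that, at each first occurrence, recomputes the count by scanning rows.count(row) and emits the formatted row immediately.
import Mathlib
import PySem

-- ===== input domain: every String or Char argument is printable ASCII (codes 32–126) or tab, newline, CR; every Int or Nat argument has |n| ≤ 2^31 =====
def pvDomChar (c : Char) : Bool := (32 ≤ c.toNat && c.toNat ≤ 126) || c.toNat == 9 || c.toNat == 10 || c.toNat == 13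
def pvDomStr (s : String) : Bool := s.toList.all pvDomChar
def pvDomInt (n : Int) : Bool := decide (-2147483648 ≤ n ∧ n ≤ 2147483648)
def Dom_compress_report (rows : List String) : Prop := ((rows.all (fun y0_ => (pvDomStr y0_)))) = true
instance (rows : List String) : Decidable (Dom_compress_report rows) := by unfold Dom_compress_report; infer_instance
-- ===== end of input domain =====

-- B replaces A's count-dict pass with a single pass over rows keeping a 'seen' set and
-- recomputing each new row's count by rows.count(row) (objective: alternative decomposition).

-- ===== PORT A =====
def compress_report (rows : List String) : List String :=
  let rep : PySem.Dict String Int :=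
    rows.foldl (fun rep row =>
      if rep.keys.contains row = false then rep.insert row 1
      else rep.insert row (rep.getD row 0 + 1)) PySem.Dict.empty
  rep.keys.foldl (fun report k =>
    if rep.getD k 0 > 1 then report ++ [k ++ " (x" ++ PySem.Int.toStr (rep.getD k 0) ++ ")"]
    else report ++ [k]) []

-- ===== PORT B =====
def compress_report_alt (rows : List String) : List String :=
  (rows.foldl (fun (st : PySem.Set String × List String) row =>
      if PySem.Set.contains st.1 row then st
      else
        let c : Int := (PySem.List.count rows row : Int)
        (PySem.Set.add st.1 row,
         st.2 ++ [if c = 1 then row else row ++ " (x" ++ PySem.Int.toStr c ++ ")"]))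
    (PySem.Set.empty, [])).2

-- ===== PRECONDITION & SPEC =====
def Spec_compress_report (rows : List String) (out : List String) : Prop := out = compress_report_alt rows
instance (rows : List String) (out : List String) : Decidable (Spec_compress_report rows out) := by unfold Spec_compress_report; infer_instance

-- ===== CLAIM (what is proved, stated in full; the proofs are below) =====
def Claim_equal_compress_report : Prop := ∀ (rows : List String), Dom_compress_report rows → Spec_compress_report rows (compress_report rows)

-- ===== LEMMAS AND PROOFS =====

-- the elements of l that are new w.r.t. seen-set s, in first-occurrence order
def pvNewElems (l : List String) (s : PySem.Set String) : List String :=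
  match l with
  | [] => []
  | x :: l => if PySem.Set.contains s x then pvNewElems l s
              else x :: pvNewElems l (PySem.Set.add s x)

theorem pvOfList_eq_newElems_aux (l : List String) :
    ∀ s : PySem.Set String, l.foldl PySem.Set.add s = s ++ pvNewElems l s := by
  induction l with
  | nil => intro s; simp [pvNewElems]
  | cons x l ih =>
    intro s
    by_cases h : PySem.Set.contains s x
    · have hx : x ∈ s := by simpa [PySem.Set.contains_eq_decide] using h
      simp only [pvNewElems, h, if_pos, List.foldl_cons]
      have hadd : PySem.Set.add s x = s := by simp [PySem.Set.add, hx]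
      rw [hadd, ih]
    · have hx : x ∉ s := by simpa [PySem.Set.contains_eq_decide] using h
      simp only [pvNewElems, h, List.foldl_cons, Bool.false_eq_true]
      have hadd : PySem.Set.add s x = s ++ [x] := by
        simp [PySem.Set.add, hx]
      rw [hadd, ih (s ++ [x])]
      simp

-- B's loop computes the new elements (w.r.t. the running seen-set) mapped through its formatter
theorem pvB_loop (rows l : List String) (s : PySem.Set String) (acc : List String) :
    l.foldl (fun (st : PySem.Set String × List String) row =>
      if PySem.Set.contains st.1 row then st
      else
        let c : Int := (PySem.List.count rows row : Int)
        (PySem.Set.add st.1 row,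
         st.2 ++ [if c = 1 then row else row ++ " (x" ++ PySem.Int.toStr c ++ ")"]))
      (s, acc)
    = (s ++ pvNewElems l s,
       acc ++ (pvNewElems l s).map (fun row =>
         if (PySem.List.count rows row : Int) = 1 then row
         else row ++ " (x" ++ PySem.Int.toStr (PySem.List.count rows row : Int) ++ ")")) := by
  induction l generalizing s acc with
  | nil => simp [pvNewElems]
  | cons x l ih =>
    by_cases h : PySem.Set.contains s x
    · simp only [List.foldl_cons, pvNewElems, h, if_pos]
      rw [ih]
    · have hx : x ∉ s := by simpa [PySem.Set.contains_eq_decide] using h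
      simp only [List.foldl_cons, pvNewElems, h, Bool.false_eq_true]
      rw [ih]
      have hadd : PySem.Set.add s x = s ++ [x] := by
        simp [PySem.Set.add, hx]
      simp [hadd]

theorem compress_report_spec' (rows : List String) :
    compress_report rows = compress_report_alt rows := by
  -- A's first loop is the Counter fold
  have hstep : (fun (rep : PySem.Dict String Int) row =>
      if rep.keys.contains row = false then rep.insert row 1
      else rep.insert row (rep.getD row 0 + 1))
    = (fun (rep : PySem.Dict String Int) row => rep.insert row (rep.getD row 0 + 1)) := by
    funext rep row
    by_cases hk : rep.keys.contains row = true
    · rw [if_neg (by simpa using hk)]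
    · have hk' : rep.keys.contains row = false := by simpa using hk
      have hm : row ∉ rep.keys := by simpa using hk'
      have hcf : rep.contains row = false := by
        rw [PySem.Dict.contains_eq_decide_mem_keys]
        simpa using hm
      have hg : rep.getD row 0 = 0 := PySem.Dict.getD_of_not_contains rep 0 hcf
      simp [hg]
  unfold compress_report
  rw [hstep, PySem.Dict.foldl_insert_getD_add_one_eq_counter]
  -- A's second loop is a map over the counter's keys
  have hloop : ∀ (ks : List String) (acc : List String),
      ks.foldl (fun report k =>
        if (PySem.Dict.counter rows).getD k 0 > 1 then
          report ++ [k ++ " (x" ++ PySem.Int.toStr ((PySem.Dict.counter rows).getD k 0) ++ ")"]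
        else report ++ [k]) acc
      = acc ++ ks.map (fun k =>
          if (PySem.Dict.counter rows).getD k 0 > 1 then
            k ++ " (x" ++ PySem.Int.toStr ((PySem.Dict.counter rows).getD k 0) ++ ")"
          else k) := by
    intro ks
    induction ks with
    | nil => intro acc; simp
    | cons k ks ih =>
      intro acc
      rw [List.foldl_cons]
      by_cases h : (PySem.Dict.counter rows).getD k 0 > 1
      · rw [if_pos h, ih, List.map_cons, if_pos h]; simp
      · rw [if_neg h, ih, List.map_cons, if_neg h]; simp
  rw [hloop, PySem.Dict.keys_counter]
  -- B's side
  unfold compress_report_alt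
  have hB := pvB_loop rows rows PySem.Set.empty []
  rw [hB]
  simp only [List.nil_append]
  have hofl : PySem.Set.ofList rows = pvNewElems rows PySem.Set.empty := by
    simpa [PySem.Set.ofList_eq_foldl, PySem.Set.empty] using
      pvOfList_eq_newElems_aux rows PySem.Set.empty
  rw [hofl]
  -- the two formatters agree on elements of rows
  apply List.map_congr_left
  intro k hk
  have hkmem : k ∈ rows := by
    have : k ∈ PySem.Set.ofList rows := by rw [hofl]; exact hk
    exact (PySem.Set.mem_ofList rows k).mp this
  have hc : 1 ≤ rows.count k := List.count_pos_iff.mpr hkmem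
  rw [PySem.Dict.getD_counter, PySem.List.count_eq]
  by_cases h1 : rows.count k = 1
  · simp [h1]
  · have h2 : 1 < rows.count k := by omega
    have h2' : (1 : Int) < (rows.count k : Int) := by exact_mod_cast h2
    have hne : ((rows.count k : Int) = 1) = False := by
      simp only [eq_iff_iff, iff_false]
      intro heq
      exact h1 (by exact_mod_cast heq)
    simp [h2', hne]

-- ===== VERDICT (by name: the statement is the Claim_ definition above) =====
theorem compress_report_spec : Claim_equal_compress_report := by
  intro rows _
  unfold Spec_compress_report
  exact compress_report_spec' rows
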